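-- pv_equiv track=rewrite | github.com/Cloxy7/Adobe_Hackathon1a | app.py | enforce_document_hierarchy
-- ===== SOURCE A (Python) =====
-- def enforce_document_hierarchy(lines_data):
--     """
--     Corrects the predicted labels based on logical document structure rules.
--     """
--     if not lines_data:
--         return []
--
--     last_heading_level = 0
--     has_title = False
--
--     for i, line in enumerate(lines_data):
--         current_label = line['predicted_label']
--
--         # Rule 1: Demote long text blocks predicted as headings.
--         # Headings are short. If it's long, it's a paragraph.
--         if current_label > 0 and line['word_count'] > 6:
--             current_label = 0
--
--         # Rule 2: Enforce a single title.
--         # Only the first "TITLE" (label 1) is kept. Others are demoted to H1.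
--         if current_label == 1:
--             if has_title:
--                 current_label = 2  # Demote to H1
--             else:
--                 has_title = True
--
--         # Rule 3: Enforce logical heading hierarchy.
--         # An H3 can't follow an H1. It must be an H2.
--         if current_label > 1: # If it's a heading (H1, H2, etc.)
--             # A heading level can't jump by more than 1 from the previous heading
--             if current_label > last_heading_level + 1:
--                 current_label = last_heading_level + 1
--             last_heading_level = current_label
--
--         # If the current block is a paragraph, reset the heading level tracker
--         # This allows a new H1 to start a new section.
--         elif current_label == 0:
--             # We don't reset to 0 because the next heading could be an H2
--             # continuing the previous section. A full reset is too simple.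
--             pass
--
--         lines_data[i]['predicted_label'] = current_label
--
--     return lines_data
-- ===== SOURCE B (Python) =====
-- def enforce_document_hierarchy(lines_data):
--     """
--     Three sequential structural passes over the same list (mutated in place):
--     demote long blocks, keep a single title, clamp heading-level jumps.
--     """
--     if not lines_data:
--         return []
--
--     # Pass 1: long text blocks predicted as headings become paragraphs.
--     for line in lines_data:
--         if line['predicted_label'] > 0 and line['word_count'] > 6:
--             line['predicted_label'] = 0
--
--     # Pass 2: only the first TITLE (label 1) survives; later ones become H1.
--     has_title = False
--     for line in lines_data:
--         if line['predicted_label'] == 1: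
--             if has_title:
--                 line['predicted_label'] = 2
--             else:
--                 has_title = True
--
--     # Pass 3: a heading level may exceed the previous heading's by at most 1.
--     last = 0
--     for line in lines_data:
--         lbl = line['predicted_label']
--         if lbl > 1:
--             lbl = min(lbl, last + 1)
--             line['predicted_label'] = lbl
--             last = lbl
--
--     return lines_data
-- ===== Notes on version B (the rewrite author's own statement) =====
-- stated objective: alternative
-- what changed: A applies all three correction rules to each element inside one combined stateful loop; B decomposes the computation into three independent sequential in-place passes (demote long blocks, keep a single title, clamp level jumps with min), each maintaining only the state its own rule needs.
import Mathlib
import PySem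

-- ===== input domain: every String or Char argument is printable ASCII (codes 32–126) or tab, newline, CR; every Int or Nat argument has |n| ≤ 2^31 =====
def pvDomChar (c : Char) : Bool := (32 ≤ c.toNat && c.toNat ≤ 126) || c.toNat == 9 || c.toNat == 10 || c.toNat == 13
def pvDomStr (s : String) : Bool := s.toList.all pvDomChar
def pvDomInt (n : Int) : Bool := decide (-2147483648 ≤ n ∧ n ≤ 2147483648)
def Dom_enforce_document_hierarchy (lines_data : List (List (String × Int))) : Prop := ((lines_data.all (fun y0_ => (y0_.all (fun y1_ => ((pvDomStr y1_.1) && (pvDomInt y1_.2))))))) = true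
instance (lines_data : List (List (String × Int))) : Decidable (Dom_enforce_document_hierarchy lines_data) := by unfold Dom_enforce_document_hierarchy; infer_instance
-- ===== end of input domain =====

-- B replaces A's single combined loop by three sequential in-place passes (demote long
-- blocks; single title; clamp level jumps with min) — objective: alternative decomposition,
-- same cost. Both Pythons mutate lines_data in place identically; the theorems are about
-- the returned value.

-- ===== PORT A =====
-- dict primitives on the association-list encoding of a Python dict:
-- line[k] = first-match lookup; line[k] = v overwrites the first match in place (appends if absent).
def pvGetKey : List (String × Int) → String → Option Int
  | [], _ => none
  | (k, v) :: r, x => if k = x then some v else pvGetKey r x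

def pvSetKey : List (String × Int) → String → Int → List (String × Int)
  | [], x, w => [(x, w)]
  | (k, v) :: r, x, w => if k = x then (k, w) :: r else (k, v) :: pvSetKey r x w

-- A's single loop, carrying (last_heading_level, has_title).
-- Dict reads use `.getD 0`: exact under Pre_, which excludes the KeyError inputs.
def pvLoopA : Int → Bool → List (List (String × Int)) → List (List (String × Int))
  | _, _, [] => []
  | lhl, ht, line :: rest =>
    let cl0 := (pvGetKey line "predicted_label").getD 0
    let cl1 := if cl0 > 0 ∧ (pvGetKey line "word_count").getD 0 > 6 then (0 : Int) else cl0
    let st2 : Int × Bool := if cl1 = 1 then (if ht then (2, ht) else (1, true)) else (cl1, ht)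
    let st3 : Int × Int :=
      if st2.1 > 1 then
        (if st2.1 > lhl + 1 then (lhl + 1, lhl + 1) else (st2.1, st2.1))
      else (st2.1, lhl)
    pvSetKey line "predicted_label" st3.1 :: pvLoopA st3.2 st2.2 rest

def enforce_document_hierarchy (lines_data : List (List (String × Int))) : List (List (String × Int)) :=
  if lines_data = [] then [] else pvLoopA 0 false lines_data

-- ===== PORT B =====
-- pass 1: long text blocks predicted as headings become paragraphs
def pvPass1 (lines : List (List (String × Int))) : List (List (String × Int)) :=
  lines.map (fun line =>
    if (pvGetKey line "predicted_label").getD 0 > 0 ∧ (pvGetKey line "word_count").getD 0 > 6 then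
      pvSetKey line "predicted_label" 0
    else line)

-- pass 2: only the first TITLE (label 1) survives; later ones become H1
def pvPass2 : Bool → List (List (String × Int)) → List (List (String × Int))
  | _, [] => []
  | ht, line :: rest =>
    if (pvGetKey line "predicted_label").getD 0 = 1 then
      if ht then pvSetKey line "predicted_label" 2 :: pvPass2 ht rest
      else line :: pvPass2 true rest
    else line :: pvPass2 ht rest

-- pass 3: a heading level may exceed the previous heading's by at most 1
def pvPass3 : Int → List (List (String × Int)) → List (List (String × Int))
  | _, [] => []
  | last, line :: rest =>
    let lbl := (pvGetKey line "predicted_label").getD 0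
    if lbl > 1 then
      pvSetKey line "predicted_label" (min lbl (last + 1)) :: pvPass3 (min lbl (last + 1)) rest
    else line :: pvPass3 last rest

def enforce_document_hierarchy_alt (lines_data : List (List (String × Int))) : List (List (String × Int)) :=
  if lines_data = [] then [] else pvPass3 0 (pvPass2 false (pvPass1 lines_data))

-- ===== PRECONDITION & SPEC =====
-- Pre_ excludes exactly the inputs on which the Pythons raise KeyError: a line without the
-- 'predicted_label' key, or with a positive 'predicted_label' but no 'word_count' key.
def Pre_enforce_document_hierarchy (lines_data : List (List (String × Int))) : Prop :=
  ∀ line ∈ lines_data, "predicted_label" ∈ line.map Prod.fst ∧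
    ((line.lookup "predicted_label").getD 0 > 0 → "word_count" ∈ line.map Prod.fst)
instance (lines_data : List (List (String × Int))) : Decidable (Pre_enforce_document_hierarchy lines_data) := by unfold Pre_enforce_document_hierarchy; infer_instance

def pvWitness_enforce_document_hierarchy : (List (List (String × Int))) :=
  [[("predicted_label", 1), ("word_count", 2)], [("predicted_label", 3), ("word_count", 1)]]

def Spec_enforce_document_hierarchy (lines_data : List (List (String × Int))) (out : List (List (String × Int))) : Prop := out = enforce_document_hierarchy_alt lines_data
instance (lines_data : List (List (String × Int))) (out : List (List (String × Int))) : Decidable (Spec_enforce_document_hierarchy lines_data out) := by unfold Spec_enforce_document_hierarchy; infer_instance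

-- ===== CLAIM (what is proved, stated in full; the proofs are below) =====
def Claim_equal_enforce_document_hierarchy : Prop := ∀ (lines_data : List (List (String × Int))), Dom_enforce_document_hierarchy lines_data → Pre_enforce_document_hierarchy lines_data → Spec_enforce_document_hierarchy lines_data (enforce_document_hierarchy lines_data)

-- ===== LEMMAS AND PROOFS =====

-- reading back a freshly assigned key
lemma pvGetKey_set_self (d : List (String × Int)) (x : String) (w : Int) :
    pvGetKey (pvSetKey d x w) x = some w := by
  induction d with
  | nil => simp [pvSetKey, pvGetKey]
  | cons p r ih =>
    obtain ⟨k, v⟩ := p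
    by_cases h : k = x <;> simp [pvSetKey, pvGetKey, h, ih]

-- two assignments to the same key collapse
lemma pvSetKey_set_self (d : List (String × Int)) (x : String) (v w : Int) :
    pvSetKey (pvSetKey d x v) x w = pvSetKey d x w := by
  induction d with
  | nil => simp [pvSetKey]
  | cons p r ih =>
    obtain ⟨k, u⟩ := p
    by_cases h : k = x <;> simp [pvSetKey, h, ih]

-- assigning a key its current value is the identity
lemma pvSetKey_get_self (d : List (String × Int)) (x : String) (v : Int)
    (h : pvGetKey d x = some v) : pvSetKey d x v = d := by
  induction d with
  | nil => simp [pvGetKey] at h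
  | cons p r ih =>
    obtain ⟨k, u⟩ := p
    by_cases hk : k = x
    · simp [pvGetKey, hk] at h
      simp [pvSetKey, hk, h]
    · simp [pvGetKey, hk] at h
      simp [pvSetKey, hk, ih h]

-- the heart of the claim: B's three passes compose to A's single loop, for any
-- (last_heading_level, has_title) state, as long as every line has 'predicted_label'.
-- a key listed among a line's keys is found by the first-match lookup
lemma pvGetKey_isSome (d : List (String × Int)) (x : String)
    (h : x ∈ d.map Prod.fst) : (pvGetKey d x).isSome = true := by
  induction d with
  | nil => simp at h
  | cons p r ih =>
    obtain ⟨k, v⟩ := p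
    by_cases hk : k = x
    · simp [pvGetKey, hk]
    · have h' : x ∈ List.map Prod.fst r := by
        simp [Ne.symm hk] at h
        simpa using h
      simp [pvGetKey, hk, ih h']

-- A's rule-3 clamp, written as the `min` B uses
lemma pvClampPair (x lhl : Int) :
    (if lhl + 1 < x then (lhl + 1, lhl + 1) else (x, x)) = (min x (lhl + 1), min x (lhl + 1)) := by
  by_cases h : lhl + 1 < x <;> simp [h] <;> omega

-- the heart of the claim: B's three passes compose to A's single loop, for any
-- (last_heading_level, has_title) state, as long as every line has 'predicted_label'.
lemma pvPasses_eq (xs : List (List (String × Int))) :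
    ∀ (lhl : Int) (ht : Bool),
      (∀ line ∈ xs, (pvGetKey line "predicted_label").isSome = true) →
      pvPass3 lhl (pvPass2 ht (pvPass1 xs)) = pvLoopA lhl ht xs := by
  induction xs with
  | nil => intro lhl ht _; simp [pvPass1, pvPass2, pvPass3, pvLoopA]
  | cons line rest ih =>
    intro lhl ht hpre
    obtain ⟨l0, hl0⟩ := Option.isSome_iff_exists.mp (hpre line (by simp))
    have IH := fun lhl ht => ih lhl ht (fun l hl => hpre l (List.mem_cons_of_mem _ hl))
    simp only [pvPass1] at IH
    by_cases hc1 : l0 > 0 ∧ (pvGetKey line "word_count").getD 0 > 6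
    · -- demoted to paragraph in pass 1; passes 2 and 3 leave it alone
      simp [pvPass1, pvPass2, pvPass3, pvLoopA, hl0, hc1, pvGetKey_set_self, IH]
    · simp only [pvPass1, List.map_cons, hl0, Option.getD_some, if_neg hc1]
      by_cases h1 : l0 = 1
      · have hwc : ¬ ((pvGetKey line "word_count").getD 0 > 6) :=
          fun h => hc1 ⟨by omega, h⟩
        cases ht with
        | true =>
          -- second title: demoted to 2 in pass 2, then clamped in pass 3
          simp [pvPass2, pvPass3, pvLoopA, hl0, h1, hwc, pvGetKey_set_self,
                pvSetKey_set_self, IH]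
          by_cases hj : lhl ≤ (0 : Int)
          · have hm : min (2 : Int) (lhl + 1) = lhl + 1 := by omega
            simp [hj, hm]
          · have hm : min (2 : Int) (lhl + 1) = 2 := by omega
            simp [hj, hm]
        | false =>
          -- first title: kept as 1, pass 3 skips it
          simp [pvPass2, pvPass3, pvLoopA, hl0, h1, hwc, IH]
          exact (pvSetKey_get_self line _ _ (h1 ▸ hl0)).symm
      · simp only [pvPass2, hl0, Option.getD_some, if_neg h1]
        by_cases hgt : l0 > 1
        · -- heading: clamped by min in pass 3
          simp [pvPass3, pvLoopA, hl0, hc1, h1, hgt, pvClampPair, IH]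
        · -- paragraph / negative label: untouched everywhere
          simp [pvPass3, pvLoopA, hl0, hc1, h1, hgt, IH]
          exact (pvSetKey_get_self line _ _ hl0).symm

-- ===== VERDICT (by name: the statement is the Claim_ definition above) =====
theorem enforce_document_hierarchy_spec : Claim_equal_enforce_document_hierarchy := by
  intro lines_data _ hpre
  unfold Spec_enforce_document_hierarchy enforce_document_hierarchy enforce_document_hierarchy_alt
  by_cases h : lines_data = []
  · simp [h]
  · simp only [if_neg h]
    exact (pvPasses_eq lines_data 0 false
      (fun l hl => pvGetKey_isSome l _ (hpre l hl).1)).symm
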